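-- pv_equiv track=rewrite | github.com/jassylee/jassy-vibe-agent | color_vibe_player.py | combine_moods
-- ===== SOURCE A (Python) =====
-- def _mood_to_search_words(mood: str) -> list[str]:
--     words: list[str] =[]
--     for part in mood.split("/"):
--         for word in part.split():
--             w = word.strip()
--             if w:
--                 words.append(w)
--     return words
--
-- def combine_moods(mood1: str, mood2: str) -> str:
--     words = _mood_to_search_words(mood1) + _mood_to_search_words(mood2)
--     seen: set[str] = set()
--     unique: list[str] =[]
--     for w in words:
--         lw = w.lower()
--         if lw not in seen:
--             seen.add(lw)
--             unique.append(w)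
--     phrase = " ".join(unique)
--     return f"{phrase} Music" if phrase else "Music"
-- ===== SOURCE B (Python) =====
-- def combine_moods(mood1: str, mood2: str) -> str:
--     # single character-level scan: no split() calls, one state machine pass
--     seen: set[str] = set()
--     parts: list[str] = []
--     cur: list[str] = []
--     for ch in mood1 + "/" + mood2 + "/":
--         if ch == "/" or ch.isspace():
--             if cur:
--                 word = "".join(cur)
--                 lw = word.lower()
--                 if lw not in seen:
--                     seen.add(lw)
--                     parts.append(word)
--                 cur = []
--         else:
--             cur.append(ch)
--     parts.append("Music")
--     return " ".join(parts)
-- ===== Notes on version B (the rewrite author's own statement) =====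
-- stated objective: alternative
-- what changed: Replaces A's three staged passes (nested split('/')/split() tokenization into a list, then a separate dedup loop over that list, then a join) with a single character-level state machine that scans the concatenated input once, flushing each word at a separator directly into the deduplicated output, and appends 'Music' as a final token instead of A's conditional phrase formatting.
import Mathlib
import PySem

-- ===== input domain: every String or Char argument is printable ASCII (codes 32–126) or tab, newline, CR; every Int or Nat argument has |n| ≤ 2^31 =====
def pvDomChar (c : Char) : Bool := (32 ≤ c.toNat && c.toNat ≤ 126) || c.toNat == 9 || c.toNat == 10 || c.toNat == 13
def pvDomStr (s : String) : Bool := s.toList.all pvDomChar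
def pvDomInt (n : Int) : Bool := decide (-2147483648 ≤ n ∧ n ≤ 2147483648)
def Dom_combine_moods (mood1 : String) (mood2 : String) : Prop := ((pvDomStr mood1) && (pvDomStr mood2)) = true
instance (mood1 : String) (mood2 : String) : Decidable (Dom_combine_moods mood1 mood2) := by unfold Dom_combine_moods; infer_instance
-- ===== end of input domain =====

-- B replaces A's staged split/dedup/join passes by one character-level state machine over the
-- concatenated input, emitting each word into the deduplicated output as its separator is reached
-- (objective: alternative decomposition, same cost).

-- ===== PORT A =====
def _mood_to_search_words (mood : String) : List String :=
  ((PySem.Str.split? mood "/").getD []).foldl (fun words part =>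
    (PySem.Str.split₀ part).foldl (fun words word =>
      let w := PySem.Str.strip word
      if w ≠ "" then words ++ [w] else words) words) []

def combine_moods (mood1 : String) (mood2 : String) : String :=
  let words := _mood_to_search_words mood1 ++ _mood_to_search_words mood2
  let su := words.foldl (fun (su : PySem.Set String × List String) w =>
      let lw := PySem.Str.lower w
      if lw ∈ su.1 then su else (su.1.add lw, su.2 ++ [w]))
    (PySem.Set.empty, [])
  let phrase := PySem.Str.join " " su.2
  if phrase ≠ "" then phrase ++ " Music" else "Music"

-- ===== PORT B =====
-- the loop body of B's single scan (cur is Python's `cur` list of characters)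
def pvScanStep (st : PySem.Set String × List String × List Char) (ch : Char) :
    PySem.Set String × List String × List Char :=
  if ch == '/' || PySem.Chars.isspace ch then
    if st.2.2 ≠ [] then
      let word := String.ofList st.2.2
      let lw := PySem.Str.lower word
      if lw ∈ st.1 then (st.1, st.2.1, ([] : List Char))
      else (st.1.add lw, st.2.1 ++ [word], ([] : List Char))
    else st
  else (st.1, st.2.1, st.2.2 ++ [ch])

def combine_moods_alt (mood1 : String) (mood2 : String) : String :=
  let st := (mood1 ++ "/" ++ mood2 ++ "/").toList.foldl pvScanStep
    (PySem.Set.empty, ([] : List String), ([] : List Char))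
  PySem.Str.join " " (st.2.1 ++ ["Music"])

-- ===== PRECONDITION & SPEC =====
def Spec_combine_moods (mood1 : String) (mood2 : String) (out : String) : Prop := out = combine_moods_alt mood1 mood2
instance (mood1 : String) (mood2 : String) (out : String) : Decidable (Spec_combine_moods mood1 mood2 out) := by unfold Spec_combine_moods; infer_instance

-- ===== CLAIM (what is proved, stated in full; the proofs are below) =====
def Claim_equal_combine_moods : Prop := ∀ (mood1 : String) (mood2 : String), Dom_combine_moods mood1 mood2 → Spec_combine_moods mood1 mood2 (combine_moods mood1 mood2)

-- ===== LEMMAS AND PROOFS =====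

def pvSplitSlash : List Char → List (List Char)
  | [] => [[]]
  | c :: t => if c = '/' then [] :: pvSplitSlash t else (pvSplitSlash t).modifyHead (c :: ·)

theorem pvSplitSlash_ne_nil (l : List Char) : pvSplitSlash l ≠ [] := by
  induction l with
  | nil => simp [pvSplitSlash]
  | cons c t ih =>
    simp only [pvSplitSlash]
    split_ifs
    · simp
    · cases h : pvSplitSlash t with
      | nil => exact absurd h ih
      | cons a b => simp [List.modifyHead]

theorem pvGo_splitOn : ∀ (fuel : Nat) (l cur : List Char) (accs : List (List Char)),
    l.length ≤ fuel →
    PySem.Chars.splitOn.go ['/'] fuel l cur accs =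
      accs.reverse ++ (pvSplitSlash l).modifyHead (cur.reverse ++ ·) := by
  intro fuel
  induction fuel with
  | zero =>
    intro l cur accs h
    have : l = [] := List.eq_nil_of_length_eq_zero (Nat.le_zero.mp h)
    subst this
    rw [PySem.Chars.splitOn.go]
    simp [pvSplitSlash, List.modifyHead]
  | succ f ih =>
    intro l cur accs h
    cases l with
    | nil =>
      rw [PySem.Chars.splitOn.go]
      · simp [pvSplitSlash, List.modifyHead]
      · omega
    | cons c rest =>
      rw [PySem.Chars.splitOn.go]
      by_cases hc : c = '/'
      · subst hc
        have hpre : List.isPrefixOf ['/'] ('/' :: rest) = true := by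
          simp [List.isPrefixOf]
        rw [if_pos hpre]
        simp only [List.length_cons, List.drop_succ_cons, List.length_nil, List.drop_zero]
        rw [ih rest [] (cur.reverse :: accs) (by simpa using Nat.le_of_succ_le_succ (by simpa using h))]
        simp only [pvSplitSlash, if_pos]
        cases hps : pvSplitSlash rest with
        | nil => exact absurd hps (pvSplitSlash_ne_nil rest)
        | cons a b => simp [List.modifyHead]
      · have hpre : List.isPrefixOf ['/'] (c :: rest) = false := by
          simp [List.isPrefixOf]
          exact fun hh => hc hh.symm
        rw [if_neg (by simp [hpre])]
        rw [ih rest (c :: cur) accs (by simpa using Nat.le_of_succ_le_succ (by simpa using h))]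
        simp only [pvSplitSlash, if_neg hc]
        cases hps : pvSplitSlash rest with
        | nil => exact absurd hps (pvSplitSlash_ne_nil rest)
        | cons a b => simp [List.modifyHead, List.append_assoc]

theorem pvSplitOn_slash (l : List Char) :
    PySem.Chars.splitOn l ['/'] = pvSplitSlash l := by
  unfold PySem.Chars.splitOn
  rw [pvGo_splitOn (l.length + 1) l [] [] (by omega)]
  cases hps : pvSplitSlash l with
  | nil => exact absurd hps (pvSplitSlash_ne_nil l)
  | cons a b => simp [List.modifyHead]

def pvRepl (c : Char) : Char := if c = '/' then ' ' else c

theorem pvIntercalate_cons_cons (s x : List Char) (y : List Char) (ys : List (List Char)) :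
    List.intercalate s (x :: y :: ys) = x ++ s ++ List.intercalate s (y :: ys) := by
  simp [List.intercalate, List.intersperse]

theorem pvJoin_splitSlash (l : List Char) :
    PySem.Chars.join [' '] (pvSplitSlash l) = l.map pvRepl := by
  unfold PySem.Chars.join
  induction l with
  | nil => simp [pvSplitSlash, List.intercalate]
  | cons c t ih =>
    simp only [pvSplitSlash]
    by_cases hc : c = '/'
    · subst hc
      rw [if_pos rfl]
      cases hps : pvSplitSlash t with
      | nil => exact absurd hps (pvSplitSlash_ne_nil t)
      | cons a b =>
        rw [pvIntercalate_cons_cons]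
        rw [hps] at ih
        simp [pvRepl, ih]
    · rw [if_neg hc]
      cases hps : pvSplitSlash t with
      | nil => exact absurd hps (pvSplitSlash_ne_nil t)
      | cons a b =>
        rw [hps] at ih
        cases b with
        | nil =>
          simp [List.modifyHead, List.intercalate] at ih ⊢
          simp [pvRepl, hc, ih]
        | cons b1 bs =>
          simp only [List.modifyHead]
          rw [pvIntercalate_cons_cons] at ih ⊢
          simp [pvRepl, hc, ih]

theorem pvSplit₀_go_acc : ∀ (l cur : List Char) (acc : List (List Char)),
    PySem.Chars.split₀.go l cur acc = acc.reverse ++ PySem.Chars.split₀.go l cur [] := by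
  intro l
  induction l with
  | nil =>
    intro cur acc
    rw [PySem.Chars.split₀.go, PySem.Chars.split₀.go]
    split_ifs <;> simp
  | cons c rest ih =>
    intro cur acc
    rw [PySem.Chars.split₀.go]
    conv_rhs => rw [PySem.Chars.split₀.go]
    by_cases hs : PySem.Chars.isspace c
    · rw [if_pos hs, if_pos hs]
      by_cases he : cur.isEmpty
      · rw [if_pos he, if_pos he]
        exact ih [] acc
      · rw [if_neg he, if_neg he]
        rw [ih [] (cur.reverse :: acc), ih [] [cur.reverse]]
        simp
    · rw [if_neg hs, if_neg hs]
      exact ih (c :: cur) acc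

theorem pvSplit₀_go_space {sp : Char} (hsp : PySem.Chars.isspace sp = true) :
    ∀ (xs ys cur : List Char) (acc : List (List Char)),
    PySem.Chars.split₀.go (xs ++ sp :: ys) cur acc =
      PySem.Chars.split₀.go xs cur acc ++ PySem.Chars.split₀.go ys [] [] := by
  intro xs
  induction xs with
  | nil =>
    intro ys cur acc
    simp only [List.nil_append]
    conv_rhs => rw [PySem.Chars.split₀.go]
    conv_lhs => rw [PySem.Chars.split₀.go]
    rw [if_pos hsp]
    by_cases he : cur.isEmpty
    · rw [if_pos he, if_pos he, pvSplit₀_go_acc ys [] acc]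
    · rw [if_neg he, if_neg he, pvSplit₀_go_acc ys [] (cur.reverse :: acc)]
  | cons c rest ih =>
    intro ys cur acc
    simp only [List.cons_append]
    rw [PySem.Chars.split₀.go]
    conv_rhs => rw [PySem.Chars.split₀.go]
    by_cases hs : PySem.Chars.isspace c
    · rw [if_pos hs, if_pos hs]
      by_cases he : cur.isEmpty
      · rw [if_pos he, if_pos he, ih]
      · rw [if_neg he, if_neg he, ih]
    · rw [if_neg hs, if_neg hs, ih]

theorem pvSplit₀_append_space {sp : Char} (hsp : PySem.Chars.isspace sp = true)
    (xs ys : List Char) :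
    PySem.Chars.split₀ (xs ++ sp :: ys) = PySem.Chars.split₀ xs ++ PySem.Chars.split₀ ys := by
  unfold PySem.Chars.split₀
  exact pvSplit₀_go_space hsp xs ys [] []

theorem pvSplit₀_join (parts : List (List Char)) :
    PySem.Chars.split₀ (PySem.Chars.join [' '] parts) = (parts.map PySem.Chars.split₀).flatten := by
  induction parts with
  | nil =>
    simp [PySem.Chars.join, List.intercalate, PySem.Chars.split₀]
    rw [PySem.Chars.split₀.go]
    simp
  | cons p ps ih =>
    cases ps with
    | nil =>
      simp [PySem.Chars.join, List.intercalate]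
    | cons q qs =>
      unfold PySem.Chars.join at ih ⊢
      rw [pvIntercalate_cons_cons]
      rw [List.append_assoc]
      simp only [List.singleton_append]
      rw [pvSplit₀_append_space (by decide) p _]
      rw [ih]
      simp

theorem pvSplit₀_go_words : ∀ (l cur : List Char) (acc : List (List Char)),
    (∀ c ∈ cur, PySem.Chars.isspace c = false) →
    (∀ w ∈ acc, w ≠ [] ∧ ∀ c ∈ w, PySem.Chars.isspace c = false) →
    ∀ w ∈ PySem.Chars.split₀.go l cur acc, w ≠ [] ∧ ∀ c ∈ w, PySem.Chars.isspace c = false := by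
  intro l
  induction l with
  | nil =>
    intro cur acc hcur hacc w hw
    rw [PySem.Chars.split₀.go] at hw
    split_ifs at hw with he
    · exact hacc w (by simpa using hw)
    · simp only [List.reverse_cons'] at hw
      rcases (by simpa using hw) with h | h
      · exact hacc w h
      · subst h
        refine ⟨by simpa [List.isEmpty_iff] using he, fun c hc => hcur c (by simpa using hc)⟩
  | cons c rest ih =>
    intro cur acc hcur hacc w hw
    rw [PySem.Chars.split₀.go] at hw
    by_cases hs : PySem.Chars.isspace c
    · rw [if_pos hs] at hw
      by_cases he : cur.isEmpty
      · rw [if_pos he] at hw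
        exact ih [] acc (by simp) hacc w hw
      · rw [if_neg he] at hw
        refine ih [] (cur.reverse :: acc) (by simp) ?_ w hw
        intro v hv
        rcases List.mem_cons.mp hv with h | h
        · subst h
          exact ⟨by simpa [List.isEmpty_iff] using he, fun d hd => hcur d (by simpa using hd)⟩
        · exact hacc v h
    · rw [if_neg hs] at hw
      refine ih (c :: cur) acc ?_ hacc w hw
      intro d hd
      rcases List.mem_cons.mp hd with h | h
      · subst h; simpa using hs
      · exact hcur d h

theorem pvSplit₀_words (l : List Char) :
    ∀ w ∈ PySem.Chars.split₀ l, w ≠ [] ∧ ∀ c ∈ w, PySem.Chars.isspace c = false := by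
  exact pvSplit₀_go_words l [] [] (by simp) (by simp)

theorem pvDropWhile_no_space (l : List Char) (h : ∀ c ∈ l, PySem.Chars.isspace c = false) :
    List.dropWhile PySem.Chars.isspace l = l := by
  cases l with
  | nil => rfl
  | cons c t => simp [List.dropWhile, h c (by simp)]

theorem pvStrip_no_space (w : List Char) (h : ∀ c ∈ w, PySem.Chars.isspace c = false) :
    PySem.Chars.strip w = w := by
  unfold PySem.Chars.strip PySem.Chars.lstrip PySem.Chars.rstrip
  rw [pvDropWhile_no_space w h, pvDropWhile_no_space w.reverse
    (fun c hc => h c (List.mem_reverse.mp hc)), List.reverse_reverse]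

theorem pvInner (ws : List String) (acc : List String)
    (h : ∀ x ∈ ws, PySem.Str.strip x = x ∧ x ≠ "") :
    ws.foldl (fun words word =>
      let w := PySem.Str.strip word
      if w ≠ "" then words ++ [w] else words) acc = acc ++ ws := by
  induction ws generalizing acc with
  | nil => simp
  | cons x t ih =>
    simp only [List.foldl_cons]
    obtain ⟨hs, hne⟩ := h x (by simp)
    rw [show (let w := PySem.Str.strip x;
        if w ≠ "" then acc ++ [w] else acc) = acc ++ [x] by simp [hs, hne]]
    rw [ih (acc ++ [x]) (fun y hy => h y (by simp [hy]))]
    simp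

theorem pvSplit₀_str (p : List Char) :
    PySem.Str.split₀ (String.ofList p) = List.map String.ofList (PySem.Chars.split₀ p) := by
  simp [PySem.Str.split₀]

theorem pvInnerWords (p : List Char) :
    ∀ x ∈ PySem.Str.split₀ (String.ofList p), PySem.Str.strip x = x ∧ x ≠ "" := by
  intro x hx
  rw [pvSplit₀_str] at hx
  obtain ⟨w, hw, rfl⟩ := List.mem_map.mp hx
  obtain ⟨hne, hns⟩ := pvSplit₀_words p w hw
  constructor
  · rw [show PySem.Str.strip (String.ofList w)
        = String.ofList (PySem.Chars.strip (String.ofList w).toList) from rfl]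
    rw [String.toList_ofList, pvStrip_no_space w hns]
  · intro hc
    have : (String.ofList w).toList = ("" : String).toList := by rw [hc]
    simp at this
    exact hne this

theorem pvOuter (parts : List (List Char)) (acc : List String) :
    (parts.map String.ofList).foldl (fun words part =>
      (PySem.Str.split₀ part).foldl (fun words word =>
        let w := PySem.Str.strip word
        if w ≠ "" then words ++ [w] else words) words) acc
    = acc ++ List.map String.ofList ((parts.map PySem.Chars.split₀).flatten) := by
  induction parts generalizing acc with
  | nil => simp
  | cons p ps ih =>
    simp only [List.map_cons, List.foldl_cons]
    rw [pvInner _ acc (pvInnerWords p), pvSplit₀_str, ih]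
    simp

theorem pvSplitQ_slash (s : String) :
    PySem.Str.split? s "/" = some (List.map String.ofList (pvSplitSlash s.toList)) := by
  rw [show PySem.Str.split? s "/" = Option.map (List.map String.ofList)
      (PySem.Chars.split? s.toList ("/" : String).toList) from rfl]
  rw [show ("/" : String).toList = ['/'] from rfl]
  unfold PySem.Chars.split?
  rw [if_neg (by simp)]
  rw [pvSplitOn_slash]
  rfl

theorem pvMood_words (mood : String) :
    _mood_to_search_words mood =
      List.map String.ofList (((pvSplitSlash mood.toList).map PySem.Chars.split₀).flatten) := by
  unfold _mood_to_search_words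
  rw [pvSplitQ_slash, Option.getD_some, pvOuter]
  simp

-- split₀ of the '/'-replaced string = A's token stream for one mood
theorem pvSplit₀_repl (l : List Char) :
    PySem.Chars.split₀ (l.map pvRepl) = ((pvSplitSlash l).map PySem.Chars.split₀).flatten := by
  rw [← pvJoin_splitSlash l, pvSplit₀_join]

-- ===== B-side scan lemmas =====

def pvSep (c : Char) : Bool := (c == '/') || PySem.Chars.isspace c

theorem pvIsspace_repl (c : Char) : PySem.Chars.isspace (pvRepl c) = pvSep c := by
  by_cases hc : c = '/'
  · subst hc; decide
  · have h1 : pvRepl c = c := by simp [pvRepl, hc]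
    have h2 : (c == '/') = false := by simpa using hc
    simp [h1, pvSep, h2]

-- pure tokenizer mirroring the scan: (tokens emitted, final cur)
def pvTok : List Char → List Char → List (List Char) × List Char
  | [], cur => ([], cur)
  | c :: t, cur =>
    if pvSep c then
      if cur ≠ [] then
        let r := pvTok t []
        (cur :: r.1, r.2)
      else pvTok t []
    else pvTok t (cur ++ [c])

def pvDStep (su : PySem.Set String × List String) (w : String) :
    PySem.Set String × List String :=
  let lw := PySem.Str.lower w
  if lw ∈ su.1 then su else (su.1.add lw, su.2 ++ [w])

theorem pvScan (l : List Char) : ∀ (seen : PySem.Set String) (parts : List String) (cur : List Char),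
    l.foldl pvScanStep (seen, parts, cur) =
      ((((pvTok l cur).1.map String.ofList).foldl pvDStep (seen, parts)).1,
       (((pvTok l cur).1.map String.ofList).foldl pvDStep (seen, parts)).2,
       (pvTok l cur).2) := by
  induction l with
  | nil => intro seen parts cur; simp [pvTok]
  | cons c t ih =>
    intro seen parts cur
    simp only [List.foldl_cons, pvTok]
    by_cases hs : pvSep c
    · rw [if_pos hs]
      have hstep : pvScanStep (seen, parts, cur) c =
          if cur ≠ [] then
            (if PySem.Str.lower (String.ofList cur) ∈ seen then (seen, parts, ([] : List Char))
             else (seen.add (PySem.Str.lower (String.ofList cur)),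
                   parts ++ [String.ofList cur], ([] : List Char)))
          else (seen, parts, cur) := by
        unfold pvScanStep
        rw [if_pos (by simpa [pvSep] using hs)]
      by_cases he : cur ≠ []
      · rw [if_pos he] at hstep ⊢
        rw [hstep]
        by_cases hm : PySem.Str.lower (String.ofList cur) ∈ seen
        · rw [if_pos hm]
          rw [ih seen parts []]
          simp only [List.map_cons, List.foldl_cons]
          rw [show pvDStep (seen, parts) (String.ofList cur) = (seen, parts) by
            unfold pvDStep; simp [hm]]
        · rw [if_neg hm]
          rw [ih _ _ []]
          simp only [List.map_cons, List.foldl_cons]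
          rw [show pvDStep (seen, parts) (String.ofList cur)
              = (seen.add (PySem.Str.lower (String.ofList cur)), parts ++ [String.ofList cur]) by
            unfold pvDStep; simp [hm]]
      · rw [if_neg he] at hstep ⊢
        rw [hstep]
        have hc0 : cur = [] := by simpa using he
        subst hc0
        exact ih seen parts []
    · rw [if_neg hs]
      have hstep : pvScanStep (seen, parts, cur) c = (seen, parts, cur ++ [c]) := by
        unfold pvScanStep
        rw [if_neg (by simpa [pvSep] using hs)]
      rw [hstep]
      exact ih seen parts (cur ++ [c])

def pvFlush (cur : List Char) : List (List Char) := if cur = [] then [] else [cur]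

theorem pvTok_split : ∀ (l cur : List Char),
    PySem.Chars.split₀.go (l.map pvRepl) cur.reverse [] =
      (pvTok l cur).1 ++ pvFlush (pvTok l cur).2 := by
  intro l
  induction l with
  | nil =>
    intro cur
    simp only [List.map_nil]
    rw [PySem.Chars.split₀.go]
    by_cases he : cur = []
    · subst he; simp [pvTok, pvFlush]
    · rw [if_neg (by simpa [List.isEmpty_iff] using he)]
      simp [pvTok, pvFlush, he]
  | cons c t ih =>
    intro cur
    simp only [List.map_cons]
    rw [PySem.Chars.split₀.go, pvIsspace_repl c]
    by_cases hs : pvSep c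
    · rw [if_pos hs]
      by_cases he : cur = []
      · subst he
        rw [if_pos (by simp)]
        have h := ih []
        simpa [pvTok, hs] using h
      · rw [if_neg (by simpa [List.isEmpty_iff] using he)]
        rw [pvSplit₀_go_acc (t.map pvRepl) [] [cur.reverse.reverse]]
        have h := ih []
        simp only [List.reverse_nil] at h
        rw [h]
        have hR : pvTok (c :: t) cur = (cur :: (pvTok t []).1, (pvTok t []).2) := by
          simp [pvTok, hs, he]
        rw [hR]
        simp
    · rw [if_neg hs]
      have hcc : pvRepl c = c := by
        have hne : c ≠ '/' := by intro hh; subst hh; exact hs (by decide)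
        simp [pvRepl, hne]
      rw [hcc, show c :: cur.reverse = (cur ++ [c]).reverse by simp, ih (cur ++ [c])]
      have hR : pvTok (c :: t) cur = pvTok t (cur ++ [c]) := by simp [pvTok, hs]
      rw [hR]

theorem pvTok_append : ∀ (a b cur : List Char),
    pvTok (a ++ b) cur = ((pvTok a cur).1 ++ (pvTok b (pvTok a cur).2).1,
                          (pvTok b (pvTok a cur).2).2) := by
  intro a
  induction a with
  | nil => intro b cur; simp [pvTok]
  | cons c t ih =>
    intro b cur
    simp only [List.cons_append, pvTok]
    by_cases hs : pvSep c
    · rw [if_pos hs, if_pos hs]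
      by_cases he : cur ≠ []
      · rw [if_pos he, if_pos he]
        simp [ih b []]
      · rw [if_neg he, if_neg he]
        exact ih b []
    · rw [if_neg hs, if_neg hs]
      exact ih b (cur ++ [c])

theorem pvTok_flush (l : List Char) : pvTok (l ++ ['/']) [] = (PySem.Chars.split₀ (l.map pvRepl), []) := by
  have h2 : (pvTok (l ++ ['/']) []).2 = [] := by
    rw [pvTok_append l ['/'] []]
    by_cases he : (pvTok l []).2 ≠ [] <;> simp [pvSep, he, pvTok]
  have h1 : (pvTok (l ++ ['/']) []).1 = PySem.Chars.split₀ (l.map pvRepl) := by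
    have h := pvTok_split (l ++ ['/']) []
    rw [h2] at h
    simp [pvFlush] at h
    rw [← h]
    unfold PySem.Chars.split₀
    rw [show [pvRepl '/'] = ' ' :: [] from by decide]
    rw [pvSplit₀_go_space (by decide) (l.map pvRepl) [] [] []]
    rw [PySem.Chars.split₀.go]
    simp
  exact Prod.ext h1 h2

theorem pvDFold_ne (toks : List String) : ∀ (su : PySem.Set String × List String),
    (∀ p ∈ su.2, p ≠ "") → (∀ t ∈ toks, t ≠ "") →
    ∀ p ∈ (toks.foldl pvDStep su).2, p ≠ "" := by
  induction toks with
  | nil => intro su h _ p hp; exact h p hp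
  | cons w t ih =>
    intro su h ht p hp
    refine ih (pvDStep su w) ?_ (fun x hx => ht x (by simp [hx])) p hp
    intro q hq
    by_cases hm : PySem.Str.lower w ∈ su.1
    · simp [pvDStep, hm] at hq
      exact h q hq
    · simp [pvDStep, hm] at hq
      rcases hq with hql | hql
      · exact h q hql
      · subst hql; exact ht q (by simp)

theorem pvIntercalate_append_one (s y : List Char) :
    ∀ (x : List Char) (xs : List (List Char)),
    List.intercalate s ((x :: xs) ++ [y]) = List.intercalate s (x :: xs) ++ s ++ y := by
  intro x xs
  induction xs generalizing x with
  | nil =>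
    rw [show (x :: []) ++ [y] = x :: y :: [] by simp, pvIntercalate_cons_cons]
    simp [List.intercalate]
  | cons z zs ih =>
    rw [show (x :: z :: zs) ++ [y] = x :: ((z :: zs) ++ [y]) by simp]
    rw [show x :: ((z :: zs) ++ [y]) = x :: (z :: (zs ++ [y])) by simp]
    rw [pvIntercalate_cons_cons s x z (zs ++ [y])]
    rw [show z :: (zs ++ [y]) = (z :: zs) ++ [y] by simp]
    rw [ih z, pvIntercalate_cons_cons]
    simp

theorem pvIntercalate_head_ne (s : List Char) (x : List Char) (xs : List (List Char))
    (hx : x ≠ []) : List.intercalate s (x :: xs) ≠ [] := by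
  cases xs with
  | nil => simpa [List.intercalate]
  | cons z zs =>
    rw [pvIntercalate_cons_cons]
    simp [hx]

theorem pvJoin_music (u : List String) (h : ∀ p ∈ u, p ≠ "") :
    PySem.Str.join " " (u ++ ["Music"]) =
      (if PySem.Str.join " " u ≠ "" then PySem.Str.join " " u ++ " Music" else "Music") := by
  cases u with
  | nil => decide
  | cons x xs =>
    have hx : x.toList ≠ [] := by
      intro hc
      exact h x (by simp) (by
        have : String.ofList x.toList = String.ofList [] := by rw [hc]
        simpa using this)
    have hjoin : (PySem.Str.join " " (x :: xs)).toList
        = List.intercalate [' '] ((x :: xs).map String.toList) := by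
      simp [PySem.Str.toList_join, PySem.Chars.join]
    have hne : PySem.Str.join " " (x :: xs) ≠ "" := by
      intro hc
      have : (PySem.Str.join " " (x :: xs)).toList = [] := by rw [hc]; rfl
      rw [hjoin] at this
      exact pvIntercalate_head_ne [' '] x.toList (xs.map String.toList) hx (by simpa using this)
    rw [if_pos hne]
    have hlist : (PySem.Str.join " " ((x :: xs) ++ ["Music"])).toList
        = (PySem.Str.join " " (x :: xs) ++ " Music").toList := by
      rw [String.toList_append, hjoin]
      simp only [PySem.Str.toList_join, PySem.Chars.join, List.map_append]
      rw [show ((x :: xs).map String.toList) ++ (["Music"].map String.toList)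
          = (x.toList :: xs.map String.toList) ++ ["Music".toList] by simp]
      rw [pvIntercalate_append_one]
      simp
    have hfin := congrArg String.ofList hlist
    rwa [String.ofList_toList, String.ofList_toList] at hfin

-- ===== VERDICT (by name: the statement is the Claim_ definition above) =====
theorem combine_moods_spec : Claim_equal_combine_moods := by
  intro mood1 mood2 _
  unfold Spec_combine_moods combine_moods combine_moods_alt
  dsimp only
  -- character stream of B
  have hchars : (mood1 ++ "/" ++ mood2 ++ "/").toList
      = (mood1.toList ++ ['/']) ++ (mood2.toList ++ ['/']) := by
    simp [String.toList_append]
  rw [hchars]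
  -- B's scan = dedup-fold over its token stream
  rw [pvScan ((mood1.toList ++ ['/']) ++ (mood2.toList ++ ['/'])) PySem.Set.empty [] []]
  have htok : (pvTok ((mood1.toList ++ ['/']) ++ (mood2.toList ++ ['/'])) []).1
      = PySem.Chars.split₀ (mood1.toList.map pvRepl) ++ PySem.Chars.split₀ (mood2.toList.map pvRepl) := by
    rw [pvTok_append, pvTok_flush, pvTok_flush]
  -- A's token list equals B's token stream (as strings)
  have hwords : _mood_to_search_words mood1 ++ _mood_to_search_words mood2
      = (pvTok ((mood1.toList ++ ['/']) ++ (mood2.toList ++ ['/'])) []).1.map String.ofList := by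
    rw [htok, pvMood_words, pvMood_words]
    simp [pvSplit₀_repl]
  -- A's dedup fold is pvDStep
  have hfold : ∀ (ws : List String),
      ws.foldl (fun (su : PySem.Set String × List String) w =>
        let lw := PySem.Str.lower w
        if lw ∈ su.1 then su else (su.1.add lw, su.2 ++ [w])) (PySem.Set.empty, [])
      = ws.foldl pvDStep (PySem.Set.empty, []) := fun ws => rfl
  rw [hfold, hwords]
  -- all tokens are nonempty words
  have htoks_ne : ∀ t ∈ (pvTok ((mood1.toList ++ ['/']) ++ (mood2.toList ++ ['/'])) []).1.map String.ofList,
      t ≠ "" := by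
    rw [htok]
    intro t ht
    obtain ⟨w, hw, rfl⟩ := List.mem_map.mp ht
    rcases (by simpa using hw) with hw1 | hw1
    · obtain ⟨hne, _⟩ := pvSplit₀_words _ w hw1
      intro hc
      exact hne (by
        have : (String.ofList w).toList = ("" : String).toList := by rw [hc]
        simpa using this)
    · obtain ⟨hne, _⟩ := pvSplit₀_words _ w hw1
      intro hc
      exact hne (by
        have : (String.ofList w).toList = ("" : String).toList := by rw [hc]
        simpa using this)
  have hu_ne := pvDFold_ne _ (PySem.Set.empty, ([] : List String)) (by simp) htoks_ne
  rw [pvJoin_music _ hu_ne]
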